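-- pv_equiv track=rewrite | github.com/getuliojql/if669 | monitoria/2024.1/testes_monitoria_lista05_ex001.py | calculo_login
-- ===== SOURCE A (Python) =====
-- def calculo_login(numero, somatorio):
--     if numero == 0:
--         return somatorio
--
--     else:
--         if int(numero) % 2 == 0:
--             somatorio += str(numero * 2)
--
--         else:
--             somatorio += str(numero * 3)
--
--         return calculo_login(int(numero) - 1, somatorio)
-- ===== SOURCE B (Python) =====
-- def calculo_login(numero, somatorio):
--     parts = [str(n * 2) if int(n) % 2 == 0 else str(n * 3) for n in range(numero, 0, -1)]
--     return somatorio + "".join(parts)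
-- ===== Notes on version B (the rewrite author's own statement) =====
-- stated objective: alternative
-- what changed: Replaces A's tail recursion (appending to an accumulator on the way down) by a list comprehension over range(numero, 0, -1) whose pieces are joined once and appended to somatorio.
import Mathlib
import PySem

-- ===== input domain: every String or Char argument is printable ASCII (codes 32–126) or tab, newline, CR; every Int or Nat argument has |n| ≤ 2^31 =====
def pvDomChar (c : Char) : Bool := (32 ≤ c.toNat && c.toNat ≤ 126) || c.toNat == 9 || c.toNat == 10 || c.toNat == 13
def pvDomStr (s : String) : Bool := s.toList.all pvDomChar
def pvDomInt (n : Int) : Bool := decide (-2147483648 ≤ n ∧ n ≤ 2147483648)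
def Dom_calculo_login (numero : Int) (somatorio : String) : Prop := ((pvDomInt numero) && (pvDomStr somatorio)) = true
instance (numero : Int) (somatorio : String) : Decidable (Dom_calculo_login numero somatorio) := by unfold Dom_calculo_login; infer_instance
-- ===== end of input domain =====

-- B replaces A's recursion by a list comprehension over range(numero, 0, -1) joined once (different decomposition, not faster).

-- ===== PORT A =====
-- literal port of A's recursion; the 'numero < 0' guard only makes the port total —
-- Python recurses forever (RecursionError) there, which Pre_ excludes.
def calculo_login (numero : Int) (somatorio : String) : String :=
  if numero = 0 then somatorio
  else
    let s := if PySem.Int.mod numero 2 = 0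
             then somatorio ++ PySem.Int.toStr (numero * 2)
             else somatorio ++ PySem.Int.toStr (numero * 3)
    if numero < 0 then s
    else calculo_login (numero - 1) s
termination_by numero.toNat
decreasing_by omega

-- ===== PORT B =====
def calculo_login_alt (numero : Int) (somatorio : String) : String :=
  let parts := (PySem.List.pyRange numero 0 (-1)).map
    (fun n => if PySem.Int.mod n 2 = 0 then PySem.Int.toStr (n * 2) else PySem.Int.toStr (n * 3))
  somatorio ++ String.join parts

-- ===== PRECONDITION & SPEC =====
-- Pre_ excludes numero < 0 (A recurses past 0 forever) and numero > 900: beyond CPython's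
-- recursion limit (~1000; the exact cutoff depends on call depth, so 900 is conservative)
-- A raises RecursionError.
def Pre_calculo_login (numero : Int) (somatorio : String) : Prop := 0 ≤ numero ∧ numero ≤ 900
instance (numero : Int) (somatorio : String) : Decidable (Pre_calculo_login numero somatorio) := by unfold Pre_calculo_login; infer_instance
def pvWitness_calculo_login : Int × String := (5, "x")

def Spec_calculo_login (numero : Int) (somatorio : String) (out : String) : Prop := out = calculo_login_alt numero somatorio
instance (numero : Int) (somatorio : String) (out : String) : Decidable (Spec_calculo_login numero somatorio out) := by unfold Spec_calculo_login; infer_instance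

-- ===== CLAIM (what is proved, stated in full; the proofs are below) =====
def Claim_equal_calculo_login : Prop := ∀ (numero : Int) (somatorio : String), Dom_calculo_login numero somatorio → Pre_calculo_login numero somatorio → Spec_calculo_login numero somatorio (calculo_login numero somatorio)

-- ===== LEMMAS AND PROOFS =====

theorem append_foldl_append (l : List String) : ∀ (a b : String),
    a ++ l.foldl (fun r s => r ++ s) b = l.foldl (fun r s => r ++ s) (a ++ b) := by
  induction l with
  | nil => intro a b; rfl
  | cons h t ih => intro a b; simp only [List.foldl_cons, ih, String.append_assoc]

theorem calculo_login_eq_alt (k : Nat) : ∀ (numero : Int) (somatorio : String),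
    0 ≤ numero → numero.toNat = k → calculo_login numero somatorio = calculo_login_alt numero somatorio := by
  induction k with
  | zero =>
    intro n s hn hk
    have hz : n = 0 := by omega
    subst hz
    rw [calculo_login, calculo_login_alt]
    simp [PySem.List.pyRange_neg_one_eq_nil (by omega : (0:Int) ≤ 0), String.join]
  | succ k ih =>
    intro n s hn hk
    have hpos : 0 < n := by omega
    rw [calculo_login]
    have hne : ¬ n = 0 := by omega
    have hnlt : ¬ n < 0 := by omega
    simp only [hne, if_false, hnlt]
    by_cases h2 : PySem.Int.mod n 2 = 0 <;>
      simp only [h2, if_true, if_false] <;>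
      [rw [ih (n - 1) (s ++ PySem.Int.toStr (n * 2)) (by omega) (by omega)];
       rw [ih (n - 1) (s ++ PySem.Int.toStr (n * 3)) (by omega) (by omega)]] <;>
      rw [calculo_login_alt, calculo_login_alt] <;>
      rw [PySem.List.pyRange_neg_one_cons (by omega : (0:Int) < n)] <;>
      simp only [List.map_cons, String.join, List.foldl_cons, h2, if_true, if_false] <;>
      rw [String.append_assoc, append_foldl_append, String.append_empty, String.empty_append]

-- ===== VERDICT (by name: the statement is the Claim_ definition above) =====
theorem calculo_login_spec : Claim_equal_calculo_login := by
  intro n s _ hpre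
  exact calculo_login_eq_alt n.toNat n s hpre.1 rfl
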